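-- pv_equiv track=rewrite | github.com/dzhao14/HackerRank_code | competitions/Week_of_Code_35/triple_recursion.py | solution
-- ===== SOURCE A (Python) =====
-- def solution(n, m, k):
--     mat = [[0 for y in range(n)] for i in range(n)]
--
--     for i in range(n):
--         for j in range(n):
--             if i == 0 and j == 0:
--                 mat[i][j] = m
--             elif i == j:
--                 mat[i][j] = mat[i-1][j-1] + k
--             elif i > j:
--                 mat[i][j] = mat[i-1][j] - 1
--             else:
--                 mat[i][j] = mat[i][j-1] - 1
--
--     return mat
-- ===== SOURCE B (Python) =====
-- def solution(n, m, k):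
--     # closed form: cell (i, j) = m + min(i, j)*k - |i - j|
--     return [[m + min(i, j) * k - abs(i - j) for j in range(n)] for i in range(n)]
-- ===== Notes on version B (the rewrite author's own statement) =====
-- stated objective: simpler
-- what changed: Replaces the neighbor-reading in-place recurrence (with its i==j / i>j / i<j branch chain) by a one-line closed form m + min(i,j)*k - abs(i-j) computed independently per cell.
import Mathlib
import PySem

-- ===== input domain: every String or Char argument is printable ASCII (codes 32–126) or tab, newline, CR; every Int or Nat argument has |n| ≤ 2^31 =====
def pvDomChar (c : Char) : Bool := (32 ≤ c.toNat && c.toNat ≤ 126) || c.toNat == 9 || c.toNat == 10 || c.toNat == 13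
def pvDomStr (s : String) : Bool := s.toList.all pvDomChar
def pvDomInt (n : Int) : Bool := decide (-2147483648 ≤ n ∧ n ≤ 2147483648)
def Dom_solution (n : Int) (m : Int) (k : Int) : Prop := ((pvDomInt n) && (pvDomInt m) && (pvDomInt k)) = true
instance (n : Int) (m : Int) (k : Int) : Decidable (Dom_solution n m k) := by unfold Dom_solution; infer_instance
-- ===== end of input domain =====

-- B replaces A's neighbor-reading recurrence by the closed form m + min(i,j)*k - |i-j| per cell (simpler; A's mutation of `mat` is internal to the function, not observable).

-- ===== PORT A =====
-- mat[a][b] (read): indices are always in range during A's loop, so the default never shows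
def pvGet2 (mat : List (List Int)) (a b : Int) : Int :=
  PySem.List.pyGetD (PySem.List.pyGetD mat a []) b 0

-- mat[a][b] = v (write)
def pvSet2 (mat : List (List Int)) (a b : Int) (v : Int) : List (List Int) :=
  PySem.List.pySetD mat a (PySem.List.pySetD (PySem.List.pyGetD mat a []) b v)

def solution (n : Int) (m : Int) (k : Int) : List (List Int) :=
  let mat0 := (PySem.List.pyRange 0 n 1).map (fun _ => (PySem.List.pyRange 0 n 1).map (fun _ => (0 : Int)))
  (PySem.List.pyRange 0 n 1).foldl (fun mat i =>
    (PySem.List.pyRange 0 n 1).foldl (fun mat j =>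
      pvSet2 mat i j
        (if i == 0 && j == 0 then m
         else if i == j then pvGet2 mat (i - 1) (j - 1) + k
         else if i > j then pvGet2 mat (i - 1) j - 1
         else pvGet2 mat i (j - 1) - 1)) mat) mat0

-- ===== PORT B =====
def solution_alt (n : Int) (m : Int) (k : Int) : List (List Int) :=
  (PySem.List.pyRange 0 n 1).map (fun i =>
    (PySem.List.pyRange 0 n 1).map (fun j => m + min i j * k - |i - j|))

-- ===== PRECONDITION & SPEC =====
def Spec_solution (n : Int) (m : Int) (k : Int) (out : List (List Int)) : Prop := out = solution_alt n m k
instance (n : Int) (m : Int) (k : Int) (out : List (List Int)) : Decidable (Spec_solution n m k out) := by unfold Spec_solution; infer_instance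

-- ===== CLAIM (what is proved, stated in full; the proofs are below) =====
def Claim_equal_solution : Prop := ∀ (n : Int) (m : Int) (k : Int), Dom_solution n m k → Spec_solution n m k (solution n m k)

-- ===== LEMMAS AND PROOFS =====

-- the closed-form cell value, on Nat indices
def pvF (m k : Int) (i j : Nat) : Int := m + min (i : Int) j * k - |(i : Int) - (j : Int)|

-- row i of the loop state after the first c cells of that row are filled
def pvRow (m k : Int) (N i c : Nat) : List Int :=
  (List.range N).map (fun j => if j < c then pvF m k i j else 0)

-- loop state: rows < i finished, row i filled up to column c, rows > i still zero
def pvSt (m k : Int) (N i c : Nat) : List (List Int) :=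
  (List.range N).map (fun r =>
    if r < i then (List.range N).map (pvF m k r)
    else if r = i then pvRow m k N i c
    else (List.range N).map (fun _ => 0))

lemma pv_set_map_range {α : Type} (N a : Nat) (ha : a < N) (g : Nat → α) (v : α) :
    ((List.range N).map g).set a v = (List.range N).map (fun j => if j = a then v else g j) := by
  apply List.ext_getElem
  · simp
  · intro j h1 h2
    simp only [List.getElem_set, List.getElem_map, List.getElem_range]
    by_cases h : j = a
    · subst h; simp
    · rw [if_neg (fun e => h e.symm), if_neg h]

lemma pv_getD_map_range {α : Type} (N a : Nat) (ha : a < N) (g : Nat → α) (d : α) :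
    ((List.range N).map g).getD a d = g a := by
  simp [List.getD, ha]

lemma pv_get2_st (m k : Int) (N i c a b : Nat) (ha : a < N) (hb : b < N) :
    pvGet2 (pvSt m k N i c) a b =
      (if a < i then pvF m k a b
       else if a = i then (if b < c then pvF m k i b else 0)
       else 0) := by
  unfold pvGet2 pvSt pvRow
  rw [PySem.List.pyGetD_natCast, PySem.List.pyGetD_natCast]
  rw [pv_getD_map_range N a ha]
  split
  · rw [pv_getD_map_range N b hb]
  · split
    · rw [pv_getD_map_range N b hb]
    · rw [pv_getD_map_range N b hb]

-- one inner step: writing cell (i, c) advances the partial row by one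
lemma pv_inner_step (m k : Int) (N i c : Nat) (hi : i < N) (hc : c < N) :
    pvSet2 (pvSt m k N i c) (i:Int) (c:Int)
      (if (i:Int) == 0 && (c:Int) == 0 then m
       else if (i:Int) == (c:Int) then pvGet2 (pvSt m k N i c) ((i:Int) - 1) ((c:Int) - 1) + k
       else if (i:Int) > (c:Int) then pvGet2 (pvSt m k N i c) ((i:Int) - 1) (c:Int) - 1
       else pvGet2 (pvSt m k N i c) (i:Int) ((c:Int) - 1) - 1) = pvSt m k N i (c + 1) := by
  have hval : (if (i:Int) == 0 && (c:Int) == 0 then m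
        else if (i:Int) == (c:Int) then pvGet2 (pvSt m k N i c) ((i:Int) - 1) ((c:Int) - 1) + k
        else if (i:Int) > (c:Int) then pvGet2 (pvSt m k N i c) ((i:Int) - 1) (c:Int) - 1
        else pvGet2 (pvSt m k N i c) (i:Int) ((c:Int) - 1) - 1) = pvF m k i c := by
    by_cases h00 : i = 0 ∧ c = 0
    · obtain ⟨h1, h2⟩ := h00; subst h1; subst h2
      simp [pvF]
    · rcases Nat.lt_trichotomy i c with hlt | heq | hgt
      · -- i < c: reads (i, c-1), already filled this row
        have h1 : ¬((i:Int) == 0 && (c:Int) == 0) = true := by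
          simp; intro h; omega
        have h2 : ¬((i:Int) == (c:Int)) = true := by simp; omega
        have h3 : ¬((i:Int) > (c:Int)) := by exact_mod_cast Nat.not_lt.mpr hlt.le
        simp only [h1, h2, Bool.false_eq_true, if_false, h3]
        have hcast : (c:Int) - 1 = ((c - 1 : Nat) : Int) := by
          have : 1 ≤ c := by omega
          push_cast [this]; ring
        rw [hcast, pv_get2_st m k N i c i (c-1) hi (by omega)]
        rw [if_neg (lt_irrefl i), if_pos rfl, if_pos (show c - 1 < c by omega)]
        unfold pvF
        have h1c : (1:Nat) ≤ c := by omega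
        simp only [Nat.cast_sub h1c, Nat.cast_one]
        rw [min_eq_left (by omega), min_eq_left (by omega),
            abs_of_nonpos (by omega), abs_of_nonpos (by omega)]
        ring
      · -- i = c, not (0,0): reads (i-1, c-1)
        subst heq
        have hi1 : 1 ≤ i := by omega
        have h1 : ¬((i:Int) == 0 && (i:Int) == 0) = true := by
          simp; omega
        simp only [h1, Bool.false_eq_true, if_false, BEq.rfl, if_pos]
        have hcast : (i:Int) - 1 = ((i - 1 : Nat) : Int) := by push_cast [hi1]; ring
        rw [hcast, pv_get2_st m k N i i (i-1) (i-1) (by omega) (by omega)]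
        rw [if_pos (by omega : i - 1 < i)]
        unfold pvF
        have h4 : min ((i-1:Nat):Int) ((i-1:Nat):Int) = ((i-1:Nat):Int) := min_self _
        have h5 : min (i:Int) (i:Int) = (i:Int) := min_self _
        rw [h4, h5]
        simp only [sub_self, abs_zero]
        have : ((i-1:Nat):Int) = (i:Int) - 1 := by push_cast [hi1]; ring
        rw [this]; ring
      · -- i > c: reads (i-1, c), previous (finished) row
        have h1 : ¬((i:Int) == 0 && (c:Int) == 0) = true := by simp; omega
        have h2 : ¬((i:Int) == (c:Int)) = true := by simp; omega
        have h3 : ((i:Int) > (c:Int)) := by exact_mod_cast hgt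
        simp only [h1, h2, Bool.false_eq_true, if_false, if_pos h3]
        have hi1 : 1 ≤ i := by omega
        have hcast : (i:Int) - 1 = ((i - 1 : Nat) : Int) := by push_cast [hi1]; ring
        rw [hcast, pv_get2_st m k N i c (i-1) c (by omega) hc]
        rw [if_pos (by omega : i - 1 < i)]
        unfold pvF
        simp only [Nat.cast_sub hi1, Nat.cast_one]
        rw [min_eq_right (by omega), min_eq_right (by omega),
            abs_of_nonneg (by omega), abs_of_nonneg (by omega)]
        ring
  rw [hval]
  unfold pvSet2 pvSt
  rw [PySem.List.pyGetD_natCast, pv_getD_map_range N i hi]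
  rw [if_neg (by omega : ¬ i < i), if_pos rfl]
  rw [PySem.List.pySetD_natCast, PySem.List.pySetD_natCast]
  unfold pvRow
  rw [pv_set_map_range N c hc, pv_set_map_range N i hi]
  apply List.map_congr_left
  intro r _
  by_cases h1 : r = i
  · subst h1
    rw [if_pos rfl, if_neg (lt_irrefl r), if_pos rfl]
    apply List.map_congr_left
    intro j _
    by_cases h2 : j = c
    · subst h2; simp
    · simp only [if_neg h2]
      have : j < c ↔ j < c + 1 := by omega
      simp [this]
  · simp [h1]

-- the whole inner loop over the remaining columns of row i
lemma pv_inner (m k : Int) (N i : Nat) (hi : i < N) :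
    ∀ (d c : Nat), c + d = N →
    (List.range' c d).foldl (fun mat j =>
      pvSet2 mat (i:Int) ((j:Nat):Int)
        (if (i:Int) == 0 && ((j:Nat):Int) == 0 then m
         else if (i:Int) == ((j:Nat):Int) then pvGet2 mat ((i:Int) - 1) (((j:Nat):Int) - 1) + k
         else if (i:Int) > ((j:Nat):Int) then pvGet2 mat ((i:Int) - 1) ((j:Nat):Int) - 1
         else pvGet2 mat (i:Int) (((j:Nat):Int) - 1) - 1)) (pvSt m k N i c) = pvSt m k N i N := by
  intro d
  induction d with
  | zero =>
    intro c hc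
    have hcN : c = N := by omega
    subst hcN
    simp [List.range']
  | succ d ih =>
    intro c hc
    rw [List.range'_succ]
    simp only [List.foldl_cons]
    rw [pv_inner_step m k N i c hi (by omega)]
    exact ih (c+1) (by omega)

-- states at column boundaries
lemma pv_st_zero (m k : Int) (N i : Nat) :
    pvSt m k N i 0 = (List.range N).map (fun r =>
      if r < i then (List.range N).map (pvF m k r) else (List.range N).map (fun _ => 0)) := by
  unfold pvSt pvRow
  apply List.map_congr_left
  intro r _
  by_cases h1 : r < i
  · simp [h1]
  · rw [if_neg h1, if_neg h1]
    by_cases h2 : r = i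
    · simp [h2]
    · simp [h2]

lemma pv_st_full (m k : Int) (N i : Nat) :
    pvSt m k N i N = (List.range N).map (fun r =>
      if r < i + 1 then (List.range N).map (pvF m k r) else (List.range N).map (fun _ => 0)) := by
  unfold pvSt pvRow
  apply List.map_congr_left
  intro r hr
  rw [List.mem_range] at hr
  by_cases h1 : r < i
  · rw [if_pos h1, if_pos (by omega)]
  · simp [h1]
    by_cases h2 : r = i
    · subst h2
      rw [if_pos rfl, if_pos (by omega)]
      apply List.map_congr_left
      intro j hj
      rw [List.mem_range] at hj
      simp [hj]
    · rw [if_neg h2, if_neg (by omega)]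

-- the outer loop over the first i rows
lemma pv_outer (m k : Int) (N : Nat) :
    ∀ (i : Nat), i ≤ N →
    (List.range i).foldl (fun mat r =>
      (List.range N).foldl (fun mat j =>
        pvSet2 mat ((r:Nat):Int) ((j:Nat):Int)
          (if ((r:Nat):Int) == 0 && ((j:Nat):Int) == 0 then m
           else if ((r:Nat):Int) == ((j:Nat):Int) then pvGet2 mat (((r:Nat):Int) - 1) (((j:Nat):Int) - 1) + k
           else if ((r:Nat):Int) > ((j:Nat):Int) then pvGet2 mat (((r:Nat):Int) - 1) ((j:Nat):Int) - 1
           else pvGet2 mat ((r:Nat):Int) (((j:Nat):Int) - 1) - 1)) mat)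
      ((List.range N).map (fun _ => (List.range N).map (fun _ => (0:Int)))) =
    (List.range N).map (fun r =>
      if r < i then (List.range N).map (pvF m k r) else (List.range N).map (fun _ => 0)) := by
  intro i
  induction i with
  | zero => intro _; simp
  | succ i ih =>
    intro h
    rw [List.range_succ, List.foldl_append, ih (by omega)]
    simp only [List.foldl_cons, List.foldl_nil]
    have hinner := pv_inner m k N i (by omega) N 0 (by omega)
    rw [← List.range_eq_range'] at hinner
    rw [← pv_st_zero m k N i, hinner, pv_st_full m k N i]

lemma pv_pyRange_cast (n : Int) (hn : 0 ≤ n) :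
    PySem.List.pyRange 0 n 1 = (List.range n.toNat).map (fun j => ((j:Nat):Int)) := by
  rw [PySem.List.pyRange_one]
  simp

theorem solution_eq_alt (n m k : Int) : solution n m k = solution_alt n m k := by
  by_cases hn : n ≤ 0
  · unfold solution solution_alt
    rw [PySem.List.pyRange_one_eq_nil hn]
    simp
  · have h0 : (0:Int) ≤ n := by omega
    unfold solution solution_alt
    rw [pv_pyRange_cast n h0]
    simp only [List.foldl_map, List.map_map, Function.comp_def]
    have := pv_outer m k n.toNat n.toNat (le_refl _)
    rw [this]
    apply List.map_congr_left
    intro r hr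
    rw [List.mem_range] at hr
    rw [if_pos hr]
    unfold pvF
    rfl

-- ===== VERDICT (by name: the statement is the Claim_ definition above) =====
theorem solution_spec : Claim_equal_solution := by
  intro n m k _
  unfold Spec_solution
  exact solution_eq_alt n m k
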